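-- pv_equiv track=rewrite | github.com/amarrerod/advent24 | python/day10/day10.py | get_trailheads
-- ===== SOURCE A (Python) =====
-- def get_neighbors(i: int, j: int, rows: int, cols: int):
--     # At least one neighbor must be 1
--     right = (i, j + 1) if j + 1 < cols else None
--     left = (i, j - 1) if j - 1 >= 0 else None
--     up = (i - 1, j) if i - 1 >= 0 else None
--     down = (i + 1, j) if i + 1 < rows else None
--     return filter(None, (right, left, up, down))
--
-- def get_trailheads(map: list[list[int]]):
--     rows, cols = len(map), len(map[0])
--     for i in range(rows):
--         for j in range(cols):
--             if map[i][j] == 0: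
--                 valid_neighbors = tuple(
--                     filter(
--                         lambda t: map[t[0]][t[1]] == 1,
--                         get_neighbors(i, j, rows, cols),
--                     )
--                 )
--
--                 if valid_neighbors:
--                     yield (i, j)
-- ===== SOURCE B (Python) =====
-- def get_trailheads(map: list[list[int]]):
--     rows, cols = len(map), len(map[0])
--     result = set()
--     for i in range(rows):
--         for j in range(cols):
--             if map[i][j] == 1:
--                 for ni, nj in ((i, j + 1), (i, j - 1), (i - 1, j), (i + 1, j)):
--                     if 0 <= ni < rows and 0 <= nj < cols and map[ni][nj] == 0:
--                         result.add((ni, nj))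
--     yield from sorted(result, key=lambda t: t[0] * cols + t[1])
-- ===== Notes on version B (the rewrite author's own statement) =====
-- stated objective: alternative
-- what changed: Inverted traversal: instead of testing each 0-cell's neighborhood through a neighbor-generating helper and a filter, B scans for 1-cells, pushes their in-bounds 0-valued neighbors into a set (deduplicating zeros adjacent to several ones), and finally yields the set sorted in row-major order.
import Mathlib
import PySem

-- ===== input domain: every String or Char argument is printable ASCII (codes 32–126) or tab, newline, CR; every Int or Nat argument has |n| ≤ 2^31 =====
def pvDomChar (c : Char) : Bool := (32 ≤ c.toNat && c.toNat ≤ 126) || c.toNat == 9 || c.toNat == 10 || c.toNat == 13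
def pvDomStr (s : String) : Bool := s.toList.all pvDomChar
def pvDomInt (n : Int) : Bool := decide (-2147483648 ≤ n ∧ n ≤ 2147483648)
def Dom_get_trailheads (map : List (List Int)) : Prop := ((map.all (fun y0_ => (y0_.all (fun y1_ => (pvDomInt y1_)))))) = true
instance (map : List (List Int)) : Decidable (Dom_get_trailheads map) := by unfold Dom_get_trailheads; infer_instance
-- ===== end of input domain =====

-- B inverts A's traversal: it scans for 1-cells, collects their in-bounds 0-valued neighbors
-- in a set, and finally yields the set sorted into row-major order (objective: alternative).

-- shared helper: map[i][j] (total form; Pre_ keeps every index either port reads in range)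
def pvCell (map : List (List Int)) (i j : Int) : Int :=
  PySem.List.pyGetD (PySem.List.pyGetD map i []) j 0

-- ===== PORT A =====
def pvNeighbors (i j rows cols : Int) : List (Int × Int) :=
  ([if j + 1 < cols then some (i, j + 1) else none,
    if 0 ≤ j - 1 then some (i, j - 1) else none,
    if 0 ≤ i - 1 then some (i - 1, j) else none,
    if i + 1 < rows then some (i + 1, j) else none] : List (Option (Int × Int))).filterMap id

def get_trailheads (map : List (List Int)) : List (Int × Int) :=
  let rows : Int := map.length
  let cols : Int := (map.headD []).length
  (PySem.List.pyRange 0 rows).foldl (fun acc i =>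
    (PySem.List.pyRange 0 cols).foldl (fun acc j =>
      if pvCell map i j = 0 then
        if ((pvNeighbors i j rows cols).filter (fun t => pvCell map t.1 t.2 == 1)) ≠ [] then
          acc ++ [(i, j)]
        else acc
      else acc) acc) []

-- ===== PORT B =====
def pvResult (map : List (List Int)) : PySem.Set (Int × Int) :=
  let rows : Int := map.length
  let cols : Int := (map.headD []).length
  (PySem.List.pyRange 0 rows).foldl (fun res i =>
    (PySem.List.pyRange 0 cols).foldl (fun res j =>
      if pvCell map i j = 1 then
        [(i, j + 1), (i, j - 1), (i - 1, j), (i + 1, j)].foldl (fun res t =>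
          if 0 ≤ t.1 ∧ t.1 < rows ∧ 0 ≤ t.2 ∧ t.2 < cols ∧ pvCell map t.1 t.2 = 0 then
            res.add t
          else res) res
      else res) res) PySem.Set.empty

def get_trailheads_alt (map : List (List Int)) : List (Int × Int) :=
  let cols : Int := (map.headD []).length
  PySem.List.sorted (pvResult map) (fun t => t.1 * cols + t.2)

-- ===== PRECONDITION & SPEC =====
-- Pre_ excludes exactly the inputs on which Python A raises IndexError: the empty grid
-- (len(map[0])) and ragged grids having a row shorter than the first row (map[i][j]).
def Pre_get_trailheads (map : List (List Int)) : Prop :=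
  map ≠ [] ∧ ∀ r ∈ map, (map.headD []).length ≤ r.length
instance (map : List (List Int)) : Decidable (Pre_get_trailheads map) := by
  unfold Pre_get_trailheads; infer_instance
def pvWitness_get_trailheads : List (List Int) := [[0, 1], [1, 0]]

def Spec_get_trailheads (map : List (List Int)) (out : List (Int × Int)) : Prop := out = get_trailheads_alt map
instance (map : List (List Int)) (out : List (Int × Int)) : Decidable (Spec_get_trailheads map out) := by unfold Spec_get_trailheads; infer_instance

-- ===== CLAIM (what is proved, stated in full; the proofs are below) =====
def Claim_equal_get_trailheads : Prop := ∀ (map : List (List Int)), Dom_get_trailheads map → Pre_get_trailheads map → Spec_get_trailheads map (get_trailheads map)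

-- ===== LEMMAS AND PROOFS =====

-- the common predicate: (p,q) holds a 0 and some orthogonal in-bounds neighbor holds a 1
def pvGood (map : List (List Int)) (rows cols p q : Int) : Prop :=
  pvCell map p q = 0 ∧
    ((q + 1 < cols ∧ pvCell map p (q + 1) = 1) ∨
     (0 ≤ q - 1 ∧ pvCell map p (q - 1) = 1) ∨
     (0 ≤ p - 1 ∧ pvCell map (p - 1) q = 1) ∨
     (p + 1 < rows ∧ pvCell map (p + 1) q = 1))

lemma mem_pvNeighbors (i j rows cols : Int) (t : Int × Int) :
    t ∈ pvNeighbors i j rows cols ↔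
      ((j + 1 < cols ∧ t = (i, j + 1)) ∨ (0 ≤ j - 1 ∧ t = (i, j - 1)) ∨
       (0 ≤ i - 1 ∧ t = (i - 1, j)) ∨ (i + 1 < rows ∧ t = (i + 1, j))) := by
  simp [pvNeighbors]
lemma ACond_iff (map : List (List Int)) (rows cols i j : Int) :
    (pvCell map i j = 0 ∧
      ((pvNeighbors i j rows cols).filter (fun t => pvCell map t.1 t.2 == 1)) ≠ []) ↔
    pvGood map rows cols i j := by
  rw [pvGood, and_congr_right_iff]
  intro _
  rw [Ne, List.filter_eq_nil_iff]
  push Not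
  constructor
  · rintro ⟨t, ht, hc⟩
    rw [mem_pvNeighbors] at ht
    simp only [beq_iff_eq] at hc
    rcases ht with ⟨h, rfl⟩ | ⟨h, rfl⟩ | ⟨h, rfl⟩ | ⟨h, rfl⟩ <;> simp_all
  · rintro (⟨h, hc⟩ | ⟨h, hc⟩ | ⟨h, hc⟩ | ⟨h, hc⟩)
    · exact ⟨(i, j+1), (mem_pvNeighbors ..).mpr (Or.inl ⟨h, rfl⟩), by simpa using hc⟩
    · exact ⟨(i, j-1), (mem_pvNeighbors ..).mpr (Or.inr (Or.inl ⟨h, rfl⟩)), by simpa using hc⟩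
    · exact ⟨(i-1, j), (mem_pvNeighbors ..).mpr (Or.inr (Or.inr (Or.inl ⟨h, rfl⟩))), by simpa using hc⟩
    · exact ⟨(i+1, j), (mem_pvNeighbors ..).mpr (Or.inr (Or.inr (Or.inr ⟨h, rfl⟩))), by simpa using hc⟩

lemma mem_foldl_iff {α β : Type} [BEq α] (l : List β) (step : PySem.Set α → β → PySem.Set α)
    (Q : β → α → Prop) (h : ∀ r x z, z ∈ step r x ↔ z ∈ r ∨ Q x z) :
    ∀ (res : PySem.Set α) (z : α), z ∈ l.foldl step res ↔ z ∈ res ∨ ∃ x ∈ l, Q x z := by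
  induction l with
  | nil => simp
  | cons x l ih =>
      intro res z
      rw [List.foldl_cons, ih, h]
      simp only [List.mem_cons]
      constructor
      · rintro ((hz | hq) | ⟨y, hy, hq⟩)
        · exact Or.inl hz
        · exact Or.inr ⟨x, Or.inl rfl, hq⟩
        · exact Or.inr ⟨y, Or.inr hy, hq⟩
      · rintro (hz | ⟨y, (rfl | hy), hq⟩)
        · exact Or.inl (Or.inl hz)
        · exact Or.inl (Or.inr hq)
        · exact Or.inr ⟨y, hy, hq⟩
lemma mem_pvResult (map : List (List Int)) (z : Int × Int) :
    z ∈ pvResult map ↔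
      (0 ≤ z.1 ∧ z.1 < (map.length : Int) ∧ 0 ≤ z.2 ∧ z.2 < ((map.headD []).length : Int) ∧
        pvGood map (map.length : Int) ((map.headD []).length : Int) z.1 z.2) := by
  obtain ⟨p, q⟩ := z
  set rows : Int := (map.length : Int) with hrows
  set cols : Int := ((map.headD []).length : Int) with hcols
  have hO : ∀ (res : PySem.Set (Int × Int)) (t z : Int × Int),
      z ∈ (if 0 ≤ t.1 ∧ t.1 < rows ∧ 0 ≤ t.2 ∧ t.2 < cols ∧ pvCell map t.1 t.2 = 0 then
              res.add t else res) ↔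
        z ∈ res ∨ (z = t ∧ (0 ≤ t.1 ∧ t.1 < rows ∧ 0 ≤ t.2 ∧ t.2 < cols ∧ pvCell map t.1 t.2 = 0)) := by
    intro res t z
    split_ifs with h
    · rw [PySem.Set.mem_add]; tauto
    · tauto
  have hmid : ∀ (res : PySem.Set (Int × Int)) (i : Int) (z : Int × Int),
      z ∈ (PySem.List.pyRange 0 cols).foldl (fun res j =>
        if pvCell map i j = 1 then
          [(i, j + 1), (i, j - 1), (i - 1, j), (i + 1, j)].foldl (fun res t =>
            if 0 ≤ t.1 ∧ t.1 < rows ∧ 0 ≤ t.2 ∧ t.2 < cols ∧ pvCell map t.1 t.2 = 0 then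
              res.add t
            else res) res
        else res) res ↔
      z ∈ res ∨ ∃ j ∈ PySem.List.pyRange 0 cols, pvCell map i j = 1 ∧
        (∃ t ∈ [(i, j + 1), (i, j - 1), (i - 1, j), (i + 1, j)],
          z = t ∧ (0 ≤ t.1 ∧ t.1 < rows ∧ 0 ≤ t.2 ∧ t.2 < cols ∧ pvCell map t.1 t.2 = 0)) := by
    intro res i z
    refine mem_foldl_iff (PySem.List.pyRange 0 cols) _
      (fun j z => pvCell map i j = 1 ∧
        (∃ t ∈ [(i, j + 1), (i, j - 1), (i - 1, j), (i + 1, j)],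
          z = t ∧ (0 ≤ t.1 ∧ t.1 < rows ∧ 0 ≤ t.2 ∧ t.2 < cols ∧ pvCell map t.1 t.2 = 0))) ?_ res z
    intro r j z
    split_ifs with h
    · rw [mem_foldl_iff _ _ (fun t z => z = t ∧ (0 ≤ t.1 ∧ t.1 < rows ∧ 0 ≤ t.2 ∧ t.2 < cols ∧ pvCell map t.1 t.2 = 0)) hO r z]
      tauto
    · tauto
  rw [pvResult]
  rw [mem_foldl_iff _ _ (fun i z => ∃ j ∈ PySem.List.pyRange 0 cols, pvCell map i j = 1 ∧
        (∃ t ∈ [(i, j + 1), (i, j - 1), (i - 1, j), (i + 1, j)],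
          z = t ∧ (0 ≤ t.1 ∧ t.1 < rows ∧ 0 ≤ t.2 ∧ t.2 < cols ∧ pvCell map t.1 t.2 = 0)))
        (fun r i z => hmid r i z) _ (p, q)]
  simp only [PySem.Set.empty, List.not_mem_nil, false_or, PySem.List.mem_pyRange_one,
    List.mem_cons, or_false, pvGood]
  constructor
  · rintro ⟨i, hi, j, hj, h1, t, ht, heq, hb⟩
    rcases ht with rfl | rfl | rfl | rfl <;>
        simp only [Prod.mk.injEq] at heq <;> obtain ⟨rfl, rfl⟩ := heq
    · exact ⟨hb.1, hb.2.1, hb.2.2.1, hb.2.2.2.1, hb.2.2.2.2,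
        Or.inr (Or.inl ⟨by omega, by rw [show j + 1 - 1 = j from by omega]; exact h1⟩)⟩
    · exact ⟨hb.1, hb.2.1, hb.2.2.1, hb.2.2.2.1, hb.2.2.2.2,
        Or.inl ⟨by omega, by rw [show j - 1 + 1 = j from by omega]; exact h1⟩⟩
    · exact ⟨hb.1, hb.2.1, hb.2.2.1, hb.2.2.2.1, hb.2.2.2.2,
        Or.inr (Or.inr (Or.inr ⟨by omega, by rw [show i - 1 + 1 = i from by omega]; exact h1⟩))⟩
    · exact ⟨hb.1, hb.2.1, hb.2.2.1, hb.2.2.2.1, hb.2.2.2.2,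
        Or.inr (Or.inr (Or.inl ⟨by omega, by rw [show i + 1 - 1 = i from by omega]; exact h1⟩))⟩
  · rintro ⟨hp1, hp2, hq1, hq2, h0, hnb⟩
    rcases hnb with ⟨h, h1⟩ | ⟨h, h1⟩ | ⟨h, h1⟩ | ⟨h, h1⟩
    · refine ⟨p, ⟨hp1, hp2⟩, q + 1, ⟨by omega, h⟩, h1, (p, q + 1 - 1), ?_, ?_, ?_⟩
      · exact Or.inr (Or.inl rfl)
      · have e : q + 1 - 1 = q := by omega
        rw [e]
      · have e : q + 1 - 1 = q := by omega
        rw [e]; exact ⟨hp1, hp2, hq1, hq2, h0⟩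
    · refine ⟨p, ⟨hp1, hp2⟩, q - 1, ⟨by omega, by omega⟩, h1, (p, q - 1 + 1), ?_, ?_, ?_⟩
      · exact Or.inl rfl
      · have e : q - 1 + 1 = q := by omega
        rw [e]
      · have e : q - 1 + 1 = q := by omega
        rw [e]; exact ⟨hp1, hp2, hq1, hq2, h0⟩
    · refine ⟨p - 1, ⟨by omega, by omega⟩, q, ⟨hq1, hq2⟩, h1, (p - 1 + 1, q), ?_, ?_, ?_⟩
      · exact Or.inr (Or.inr (Or.inr rfl))
      · have e : p - 1 + 1 = p := by omega
        rw [e]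
      · have e : p - 1 + 1 = p := by omega
        rw [e]; exact ⟨hp1, hp2, hq1, hq2, h0⟩
    · refine ⟨p + 1, ⟨by omega, h⟩, q, ⟨hq1, hq2⟩, h1, (p + 1 - 1, q), ?_, ?_, ?_⟩
      · exact Or.inr (Or.inr (Or.inl rfl))
      · have e : p + 1 - 1 = p := by omega
        rw [e]
      · have e : p + 1 - 1 = p := by omega
        rw [e]; exact ⟨hp1, hp2, hq1, hq2, h0⟩
lemma nodup_foldl {α β : Type} (step : List α → β → List α) (l : List β)
    (h : ∀ r x, r.Nodup → (step r x).Nodup) :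
    ∀ acc : List α, acc.Nodup → (l.foldl step acc).Nodup := by
  induction l with
  | nil => intro acc ha; simpa using ha
  | cons x l ih => intro acc ha; exact ih _ (h _ _ ha)

lemma nodup_pvResult (map : List (List Int)) : (pvResult map).Nodup := by
  rw [pvResult]
  refine nodup_foldl _ _ ?_ _ List.nodup_nil
  intro r i hr
  refine nodup_foldl _ _ ?_ _ hr
  intro r j hr
  split_ifs with h
  · refine nodup_foldl _ _ ?_ _ hr
    intro r t hr
    split_ifs with h2
    · exact PySem.Set.nodup_add _ _ hr
    · exact hr
  · exact hr

lemma A_eq (map : List (List Int)) : get_trailheads map =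
    (PySem.List.pyRange 0 (map.length : Int)).flatMap (fun i =>
      ((PySem.List.pyRange 0 ((map.headD []).length : Int)).filter
        (fun j => decide (pvCell map i j = 0 ∧
          ((pvNeighbors i j (map.length : Int) ((map.headD []).length : Int)).filter
            (fun t => pvCell map t.1 t.2 == 1)) ≠ []))).map (fun j => (i, j))) := by
  simp only [get_trailheads]
  have hstep : ∀ (acc : List (Int × Int)) (i : Int),
      (PySem.List.pyRange 0 ((map.headD []).length : Int)).foldl (fun acc j =>
        if pvCell map i j = 0 then
          if ((pvNeighbors i j (map.length : Int) ((map.headD []).length : Int)).filter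
              (fun t => pvCell map t.1 t.2 == 1)) ≠ [] then
            acc ++ [(i, j)]
          else acc
        else acc) acc =
      acc ++ ((PySem.List.pyRange 0 ((map.headD []).length : Int)).filter
        (fun j => decide (pvCell map i j = 0 ∧
          ((pvNeighbors i j (map.length : Int) ((map.headD []).length : Int)).filter
            (fun t => pvCell map t.1 t.2 == 1)) ≠ []))).map (fun j => (i, j)) := by
    intro acc i
    rw [show (fun (acc : List (Int × Int)) (j : Int) =>
        if pvCell map i j = 0 then
          if ((pvNeighbors i j (map.length : Int) ((map.headD []).length : Int)).filter
              (fun t => pvCell map t.1 t.2 == 1)) ≠ [] then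
            acc ++ [(i, j)]
          else acc
        else acc) =
      (fun (acc : List (Int × Int)) (j : Int) =>
        if (pvCell map i j = 0 ∧
            ((pvNeighbors i j (map.length : Int) ((map.headD []).length : Int)).filter
              (fun t => pvCell map t.1 t.2 == 1)) ≠ []) then
          acc ++ [(i, j)]
        else acc) from funext fun acc => funext fun j => by split_ifs <;> tauto]
    exact PySem.List.foldl_append_ite _ _ _ _
  rw [show (fun (acc : List (Int × Int)) (i : Int) =>
      (PySem.List.pyRange 0 ((map.headD []).length : Int)).foldl (fun acc j =>
        if pvCell map i j = 0 then
          if ((pvNeighbors i j (map.length : Int) ((map.headD []).length : Int)).filter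
              (fun t => pvCell map t.1 t.2 == 1)) ≠ [] then
            acc ++ [(i, j)]
          else acc
        else acc) acc) =
    (fun (acc : List (Int × Int)) (i : Int) =>
      acc ++ ((PySem.List.pyRange 0 ((map.headD []).length : Int)).filter
        (fun j => decide (pvCell map i j = 0 ∧
          ((pvNeighbors i j (map.length : Int) ((map.headD []).length : Int)).filter
            (fun t => pvCell map t.1 t.2 == 1)) ≠ []))).map (fun j => (i, j)))
    from funext fun acc => funext fun i => hstep acc i]
  rw [PySem.List.foldl_append_eq_flatMap]
  simp

lemma mem_A (map : List (List Int)) (z : Int × Int) :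
    z ∈ get_trailheads map ↔
      (0 ≤ z.1 ∧ z.1 < (map.length : Int) ∧ 0 ≤ z.2 ∧ z.2 < ((map.headD []).length : Int) ∧
        pvGood map (map.length : Int) ((map.headD []).length : Int) z.1 z.2) := by
  obtain ⟨p, q⟩ := z
  rw [A_eq]
  simp only [List.mem_flatMap, List.mem_map, List.mem_filter, PySem.List.mem_pyRange_one,
    decide_eq_true_eq]
  constructor
  · rintro ⟨i, hi, j, ⟨hj, hc⟩, heq⟩
    simp only [Prod.mk.injEq] at heq
    obtain ⟨rfl, rfl⟩ := heq
    exact ⟨hi.1, hi.2, hj.1, hj.2, (ACond_iff map _ _ _ _).mp hc⟩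
  · rintro ⟨hp1, hp2, hq1, hq2, hg⟩
    exact ⟨p, ⟨hp1, hp2⟩, q, ⟨⟨hq1, hq2⟩, (ACond_iff map _ _ _ _).mpr hg⟩, rfl⟩

lemma pairwise_A (map : List (List Int)) :
    (get_trailheads map).Pairwise
      (fun a b => a.1 * ((map.headD []).length : Int) + a.2 <
                  b.1 * ((map.headD []).length : Int) + b.2) := by
  set cols : Int := ((map.headD []).length : Int) with hcols
  have hcols0 : 0 ≤ cols := by simp [hcols]
  have hpr : (PySem.List.pyRange 0 (map.length : Int)).Pairwise (· < ·) := by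
    rw [PySem.List.pyRange_zero_natCast]
    exact (List.pairwise_map).mpr (List.pairwise_lt_range.imp (by omega))
  have hpc : (PySem.List.pyRange 0 cols).Pairwise (· < ·) := by
    rw [hcols, PySem.List.pyRange_zero_natCast]
    exact (List.pairwise_map).mpr (List.pairwise_lt_range.imp (by omega))
  rw [A_eq, List.pairwise_flatMap]
  constructor
  · intro i _
    rw [List.pairwise_map]
    refine (hpc.filter _).imp ?_
    intro a b h
    show i * cols + a < i * cols + b
    omega
  · refine hpr.imp ?_
    intro i1 i2 h12 x hx y hy
    simp only [List.mem_map, List.mem_filter, PySem.List.mem_pyRange_one] at hx hy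
    obtain ⟨j1, ⟨hj1, _⟩, rfl⟩ := hx
    obtain ⟨j2, ⟨hj2, _⟩, rfl⟩ := hy
    have h3 : (i1 + 1) * cols ≤ i2 * cols :=
      mul_le_mul_of_nonneg_right (by omega) hcols0
    have h4 : (i1 + 1) * cols = i1 * cols + cols := by ring
    show i1 * cols + j1 < i2 * cols + j2
    omega

lemma nodup_A (map : List (List Int)) : (get_trailheads map).Nodup :=
  (pairwise_A map).imp (fun h => by rintro rfl; omega)

theorem main_eq (map : List (List Int)) : get_trailheads map = get_trailheads_alt map := by
  have hperm : (get_trailheads map).Perm (pvResult map) :=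
    (List.perm_ext_iff_of_nodup (nodup_A map) (nodup_pvResult map)).mpr
      (fun z => by rw [mem_A, mem_pvResult])
  simp only [get_trailheads_alt]
  exact (PySem.List.sorted_eq_of_perm_of_pairwise_lt (pvResult map) (get_trailheads map)
    (fun t => t.1 * ((map.headD []).length : Int) + t.2) hperm (pairwise_A map)).symm

-- ===== VERDICT (by name: the statement is the Claim_ definition above) =====
theorem get_trailheads_spec : Claim_equal_get_trailheads := by
  intro map _ _
  unfold Spec_get_trailheads
  exact main_eq map
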